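-- pv_equiv track=rewrite | github.com/wsaronam/Othello | GameLogic.py | count_blacks_and_whites
-- ===== SOURCE A (Python) =====
-- WHITE = 1
--
-- BLACK = 2
--
-- def count_blacks_and_whites(game_board: [[int]]) -> tuple:
--     '''
--     Counts the number of black and white tiles in the game.
--     '''
--     blacks = 0
--     whites = 0
--     for lst in game_board:
--         for num in lst:
--             if num == BLACK:
--                 blacks += 1
--             elif num == WHITE:
--                 whites += 1
--     return (blacks, whites)
-- ===== SOURCE B (Python) =====
-- WHITE = 1
--
-- BLACK = 2
--
-- def count_blacks_and_whites(game_board):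
--     blacks = sum(row.count(BLACK) for row in game_board)
--     whites = sum(row.count(WHITE) for row in game_board)
--     return (blacks, whites)
-- ===== Notes on version B (the rewrite author's own statement) =====
-- stated objective: idiomatic
-- what changed: Replaced the single branching double-loop accumulating two counters with two independent full-board scans using list.count, one per color.
import Mathlib
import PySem

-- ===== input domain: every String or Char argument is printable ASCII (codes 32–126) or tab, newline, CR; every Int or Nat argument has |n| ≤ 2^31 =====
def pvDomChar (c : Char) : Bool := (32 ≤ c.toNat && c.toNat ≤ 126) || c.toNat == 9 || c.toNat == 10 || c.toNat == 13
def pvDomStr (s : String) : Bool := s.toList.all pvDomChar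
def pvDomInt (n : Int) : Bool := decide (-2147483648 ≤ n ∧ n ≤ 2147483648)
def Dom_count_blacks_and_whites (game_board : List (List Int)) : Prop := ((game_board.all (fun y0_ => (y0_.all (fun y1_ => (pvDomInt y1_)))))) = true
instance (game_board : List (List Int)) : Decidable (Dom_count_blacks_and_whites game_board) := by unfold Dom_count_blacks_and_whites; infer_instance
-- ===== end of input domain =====

-- B replaces A's single branching double-loop by two independent per-color scans with list.count (idiomatic; same cost).

-- ===== PORT A =====
-- A: one pass over all rows/cells, two counters updated by an if/elif chain.
def count_blacks_and_whites (game_board : List (List Int)) : Int × Int :=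
  let bw := game_board.foldl (fun (st : Int × Int) lst =>
    lst.foldl (fun (st : Int × Int) num =>
      if num == 2 then (st.1 + 1, st.2)
      else if num == 1 then (st.1, st.2 + 1)
      else st) st) (0, 0)
  (bw.1, bw.2)

-- ===== PORT B =====
-- B: sum(row.count(BLACK)) and sum(row.count(WHITE)) as two separate scans.
def count_blacks_and_whites_alt (game_board : List (List Int)) : Int × Int :=
  let blacks : Int := (game_board.map (fun row => (PySem.List.count row 2 : Int))).sum
  let whites : Int := (game_board.map (fun row => (PySem.List.count row 1 : Int))).sum
  (blacks, whites)

-- ===== PRECONDITION & SPEC =====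
def Spec_count_blacks_and_whites (game_board : List (List Int)) (out : Int × Int) : Prop := out = count_blacks_and_whites_alt game_board
instance (game_board : List (List Int)) (out : Int × Int) : Decidable (Spec_count_blacks_and_whites game_board out) := by unfold Spec_count_blacks_and_whites; infer_instance

-- ===== CLAIM (what is proved, stated in full; the proofs are below) =====
def Claim_equal_count_blacks_and_whites : Prop := ∀ (game_board : List (List Int)), Dom_count_blacks_and_whites game_board → Spec_count_blacks_and_whites game_board (count_blacks_and_whites game_board)

-- ===== LEMMAS AND PROOFS =====

theorem row_fold_eq (lst : List Int) (b w : Int) :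
    lst.foldl (fun (st : Int × Int) num =>
      if num == 2 then (st.1 + 1, st.2)
      else if num == 1 then (st.1, st.2 + 1)
      else st) (b, w)
    = (b + (PySem.List.count lst 2 : Int), w + (PySem.List.count lst 1 : Int)) := by
  induction lst generalizing b w with
  | nil => simp [PySem.List.count]
  | cons x xs ih =>
    simp only [List.foldl, beq_iff_eq] at ih ⊢
    split_ifs with h2 h1
    · subst h2
      rw [ih]
      simp only [PySem.List.count, List.count_cons, Prod.mk.injEq]
      constructor <;> simp <;> ring
    · subst h1
      rw [ih]
      simp only [PySem.List.count, List.count_cons, Prod.mk.injEq]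
      constructor <;> simp <;> ring
    · rw [ih]
      simp only [PySem.List.count, List.count_cons, Prod.mk.injEq]
      simp [h1, h2]

theorem board_fold_eq (gb : List (List Int)) (b w : Int) :
    gb.foldl (fun (st : Int × Int) lst =>
      lst.foldl (fun (st : Int × Int) num =>
        if num == 2 then (st.1 + 1, st.2)
        else if num == 1 then (st.1, st.2 + 1)
        else st) st) (b, w)
    = (b + ((gb.map (fun row => (PySem.List.count row 2 : Int))).sum),
       w + ((gb.map (fun row => (PySem.List.count row 1 : Int))).sum)) := by
  induction gb generalizing b w with
  | nil => simp
  | cons r rs ih =>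
    simp only [List.foldl, List.map, List.sum_cons, row_fold_eq, ih, Prod.mk.injEq]
    constructor <;> ring

-- ===== VERDICT (by name: the statement is the Claim_ definition above) =====
theorem count_blacks_and_whites_spec : Claim_equal_count_blacks_and_whites := by
  intro gb _
  unfold Spec_count_blacks_and_whites count_blacks_and_whites count_blacks_and_whites_alt
  rw [board_fold_eq]
  simp
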